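-- pv_equiv track=rewrite | github.com/hnawner/music-language-modeling | RNN/utils.py | make_rnn_data
-- ===== SOURCE A (Python) =====
-- def make_rnn_data(mels, length):
--     X = []
--     y = []
--     for mel in mels:
--         if len(mel) > (length):
--             for i in range(0, (len(mel) - length)):
--                 new_inst = mel[i:(i + length)]
--                 new_target = mel[(i + 1):(i + length + 1)]
--                 X.append(new_inst)
--                 y.append(new_target)
--
--     return X, y
-- ===== SOURCE B (Python) =====
-- def make_rnn_data(mels, length):
--     # Rolling-window construction: each next window is derived from the previous
--     # one (drop its head, append the incoming element) in a single pass over the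
--     # melody's elements, instead of slicing the melody at every index.
--     X = []
--     y = []
--     for mel in mels:
--         if len(mel) > length:
--             w = mel[:length]
--             for e in mel[length:]:
--                 nxt = w[1:] + [e]
--                 X.append(w)
--                 y.append(nxt)
--                 w = nxt
--     return X, y
-- ===== Notes on version B (the rewrite author's own statement) =====
-- stated objective: alternative
-- what changed: Instead of slicing the melody twice at every window index, B rolls a single window along each melody in one pass over its elements (next window = previous window without its head plus the incoming element), appending the previous window to X and the rolled window to y; Pre_ restricts to positive window lengths, the function's natural domain, where A's degenerate empty/negative-index slices do not arise.
-- outside the precondition, e.g. on make_rnn_data([[1, 2]], 0): A returns ([[], []], [[], []]), B returns ([[], [1]], [[1], [2]])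
import Mathlib
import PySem

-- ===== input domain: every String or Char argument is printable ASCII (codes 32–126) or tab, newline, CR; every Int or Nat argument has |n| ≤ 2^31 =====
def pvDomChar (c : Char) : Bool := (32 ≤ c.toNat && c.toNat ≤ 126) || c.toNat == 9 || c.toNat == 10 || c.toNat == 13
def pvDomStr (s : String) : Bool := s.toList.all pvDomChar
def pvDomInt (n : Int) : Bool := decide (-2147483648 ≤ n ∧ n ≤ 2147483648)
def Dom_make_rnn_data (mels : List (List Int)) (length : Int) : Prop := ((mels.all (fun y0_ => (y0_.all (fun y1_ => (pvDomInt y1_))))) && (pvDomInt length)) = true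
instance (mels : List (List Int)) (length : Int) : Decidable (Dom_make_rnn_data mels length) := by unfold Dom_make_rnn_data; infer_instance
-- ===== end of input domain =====

-- B rolls one window per melody along its elements (next window = previous window minus
-- its head plus the incoming element) instead of slicing the melody at every index:
-- an alternative single-pass construction, same asymptotic cost.

-- ===== PORT A =====
def make_rnn_data (mels : List (List Int)) (length : Int) : List (List Int) × List (List Int) :=
  mels.foldl
    (fun XY mel =>
      if length < (mel.length : Int) then
        (PySem.List.pyRange 0 ((mel.length : Int) - length) 1).foldl
          (fun XY i =>
            (XY.1 ++ [PySem.List.slice mel (some i) (some (i + length))],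
             XY.2 ++ [PySem.List.slice mel (some (i + 1)) (some (i + length + 1))]))
          XY
      else XY)
    ([], [])

-- ===== PORT B =====
def make_rnn_data_alt (mels : List (List Int)) (length : Int) : List (List Int) × List (List Int) :=
  mels.foldl
    (fun XY mel =>
      if length < (mel.length : Int) then
        let s := (PySem.List.slice mel (some length) none).foldl
          (fun (s : List Int × List (List Int) × List (List Int)) e =>
            let nxt := PySem.List.slice s.1 (some 1) none ++ [e]
            (nxt, s.2.1 ++ [s.1], s.2.2 ++ [nxt]))
          (PySem.List.slice mel none (some length), XY.1, XY.2)
        (s.2.1, s.2.2)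
      else XY)
    ([], [])

-- ===== PRECONDITION & SPEC =====
-- Pre_ restricts to positive window lengths, the natural domain of a window builder;
-- for length ≤ 0 A still returns (degenerate empty/negative-index slice windows) while
-- B's rolling window does not reproduce those accidental values.
def Pre_make_rnn_data (mels : List (List Int)) (length : Int) : Prop := 1 ≤ length
instance (mels : List (List Int)) (length : Int) : Decidable (Pre_make_rnn_data mels length) := by unfold Pre_make_rnn_data; infer_instance
def pvWitness_make_rnn_data : List (List Int) × Int := ([[1, 2, 3, 4], [5]], 2)

def Spec_make_rnn_data (mels : List (List Int)) (length : Int) (out : List (List Int) × List (List Int)) : Prop := out = make_rnn_data_alt mels length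
instance (mels : List (List Int)) (length : Int) (out : List (List Int) × List (List Int)) : Decidable (Spec_make_rnn_data mels length out) := by unfold Spec_make_rnn_data; infer_instance

-- ===== CLAIM (what is proved, stated in full; the proofs are below) =====
def Claim_equal_make_rnn_data : Prop := ∀ (mels : List (List Int)) (length : Int), Dom_make_rnn_data mels length → Pre_make_rnn_data mels length → Spec_make_rnn_data mels length (make_rnn_data mels length)

-- ===== LEMMAS AND PROOFS =====

-- the window starting at position k
def pvWin (mel : List Int) (L k : Nat) : List Int := (mel.drop k).take L

-- rolling step: dropping the window's head and appending the next element advances the window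
theorem pv_tail_take (l : List Int) (n : Nat) : (l.take n).tail = l.tail.take (n - 1) := by
  rcases l with _ | ⟨a, t⟩ <;> rcases n with _ | m <;> simp

theorem pvWin_roll (mel : List Int) (L k : Nat) (hL : 1 ≤ L) (h : k + L < mel.length) :
    (pvWin mel L k).tail ++ [mel[k + L]'h] = pvWin mel L (k + 1) := by
  unfold pvWin
  rw [pv_tail_take, List.tail_drop]
  have hi : k + 1 + (L - 1) = k + L := by omega
  have hidx : (mel.drop (k + 1))[L - 1]? = some (mel[k + L]'h) := by
    rw [List.getElem?_drop, hi, List.getElem?_eq_getElem h]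
  conv_rhs => rw [show L = (L - 1) + 1 from by omega, List.take_add_one]
  simp [hidx]

-- invariant of B's rolling fold
theorem pv_roll_fold (mel : List Int) (L : Nat) (hL : 1 ≤ L) :
    ∀ (rest : List Int) (k : Nat) (X Y : List (List Int)),
      rest = mel.drop (k + L) →
      rest.foldl
        (fun (s : List Int × List (List Int) × List (List Int)) e =>
          (s.1.tail ++ [e], s.2.1 ++ [s.1], s.2.2 ++ [s.1.tail ++ [e]]))
        (pvWin mel L k, X, Y)
      = (pvWin mel L (k + rest.length),
         X ++ (List.range rest.length).map (fun j => pvWin mel L (k + j)),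
         Y ++ (List.range rest.length).map (fun j => pvWin mel L (k + j + 1))) := by
  intro rest
  induction rest with
  | nil => intro k X Y _; simp
  | cons e rest ih =>
    intro k X Y hdrop
    have hk : k + L < mel.length := by
      by_contra hc
      rw [List.drop_eq_nil_of_le (by omega)] at hdrop
      exact List.cons_ne_nil _ _ hdrop
    have he : e = mel[k + L]'hk := by
      have := congrArg (fun l => l[0]?) hdrop
      simp [List.getElem?_drop, List.getElem?_eq_getElem hk] at this
      exact this
    have hrest : rest = mel.drop ((k + 1) + L) := by
      have := congrArg List.tail hdrop
      simpa [List.tail_drop, Nat.add_right_comm k L 1] using this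
    have hroll : (pvWin mel L k).tail ++ [e] = pvWin mel L (k + 1) := by
      rw [he]; exact pvWin_roll mel L k hL hk
    simp only [List.foldl_cons, hroll]
    rw [ih (k + 1) (X ++ [pvWin mel L k]) (Y ++ [pvWin mel L (k + 1)]) hrest]
    refine Prod.ext ?_ (Prod.ext ?_ ?_)
    · simp only [List.length_cons]
      congr 1
      omega
    · simp only [List.length_cons]
      rw [List.range_succ_eq_map, List.map_cons, List.map_map]
      simp only [List.append_assoc, List.singleton_append, Nat.add_zero]
      congr 2
      apply List.map_congr_left
      intro j _
      simp only [Function.comp_def]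
      congr 1
      omega
    · simp only [List.length_cons]
      rw [List.range_succ_eq_map, List.map_cons, List.map_map]
      simp only [List.append_assoc, List.singleton_append, Nat.add_zero]
      congr 2
      apply List.map_congr_left
      intro j _
      simp only [Function.comp_def]
      congr 1
      omega

-- the per-melody step functions of the two folds agree for positive length
theorem pv_step_eq (length : Int) (h1 : 1 ≤ length) (mel : List Int) (XY : List (List Int) × List (List Int)) :
    (if length < (mel.length : Int) then
      (PySem.List.pyRange 0 ((mel.length : Int) - length) 1).foldl
        (fun XY i =>
          (XY.1 ++ [PySem.List.slice mel (some i) (some (i + length))],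
           XY.2 ++ [PySem.List.slice mel (some (i + 1)) (some (i + length + 1))]))
        XY
     else XY)
    = (if length < (mel.length : Int) then
        (let s := (PySem.List.slice mel (some length) none).foldl
          (fun (s : List Int × List (List Int) × List (List Int)) e =>
            let nxt := PySem.List.slice s.1 (some 1) none ++ [e]
            (nxt, s.2.1 ++ [s.1], s.2.2 ++ [nxt]))
          (PySem.List.slice mel none (some length), XY.1, XY.2)
        (s.2.1, s.2.2))
       else XY) := by
  by_cases h : length < (mel.length : Int)
  · simp only [if_pos h]
    set L : Nat := length.toNat with hLdef
    have hlen : (length : Int) = (L : Int) := by omega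
    have hL1 : 1 ≤ L := by omega
    have hLn : L < mel.length := by omega
    -- B side
    have hfrom : PySem.List.slice mel (some length) none = mel.drop L := by
      rw [PySem.List.slice_from _ (by omega)]
    have hto : PySem.List.slice mel none (some length) = pvWin mel L 0 := by
      rw [PySem.List.slice_to _ (by omega)]; unfold pvWin; rw [List.drop_zero, ← hLdef]
    have hdropn : (mel.drop L).length = mel.length - L := by simp
    simp only [hfrom, hto]
    rw [show (fun (s : List Int × List (List Int) × List (List Int)) e =>
            let nxt := PySem.List.slice s.1 (some 1) none ++ [e]
            (nxt, s.2.1 ++ [s.1], s.2.2 ++ [nxt]))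
        = (fun (s : List Int × List (List Int) × List (List Int)) e =>
            (s.1.tail ++ [e], s.2.1 ++ [s.1], s.2.2 ++ [s.1.tail ++ [e]])) from by
      funext s e; simp [PySem.List.slice_from_one]]
    rw [pv_roll_fold mel L hL1 (mel.drop L) 0 XY.1 XY.2 (by simp)]
    -- A side
    rw [PySem.List.foldl_prod_mk
        (f := fun acc i => acc ++ [PySem.List.slice mel (some i) (some (i + length))])
        (g := fun acc i => acc ++ [PySem.List.slice mel (some (i + 1)) (some (i + length + 1))]),
      PySem.List.foldl_append_singleton_eq_map, PySem.List.foldl_append_singleton_eq_map]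
    rw [PySem.List.pyRange_one]
    have hcount : ((mel.length : Int) - length - 0).toNat = mel.length - L := by omega
    rw [hcount]
    simp only [List.map_map, hdropn]
    refine Prod.ext ?_ ?_
    · dsimp only
      congr 1
      apply List.map_congr_left
      intro j hj
      simp only [Function.comp_def, Int.zero_add]
      rw [hlen, show ((j : Int) + (L : Int)) = (((j + L : Nat)) : Int) by push_cast; ring,
        PySem.List.slice_natCast]
      simp [pvWin]
    · dsimp only
      congr 1
      apply List.map_congr_left
      intro j hj
      simp only [Function.comp_def, Int.zero_add]
      rw [hlen, show ((j : Int) + 1) = (((j + 1 : Nat)) : Int) by push_cast; ring,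
        show (((j : Int)) + (L : Int) + 1) = (((j + 1 + L : Nat)) : Int) by push_cast; ring,
        PySem.List.slice_natCast]
      simp [pvWin]
  · simp [h]

-- ===== VERDICT (by name: the statement is the Claim_ definition above) =====
theorem make_rnn_data_spec : Claim_equal_make_rnn_data := by
  intro mels length _ hpre
  unfold Spec_make_rnn_data make_rnn_data make_rnn_data_alt
  congr 1
  funext XY mel
  exact pv_step_eq length hpre mel XY
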